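-- pv_equiv track=rewrite | github.com/ariuk44/retake_exam_prep | day_18.py | isMercurial
-- ===== SOURCE A (Python) =====
-- def isMercurial(arr):
--     seen_one = 0
--     seen_three = 0
--     for i in arr:
--         if i == 1:
--             if seen_three == 1:
--                 return 0
--             seen_one = 1
--         elif i == 3 and seen_one:
--             seen_three = 1
--     return 1
-- ===== SOURCE B (Python) =====
-- def _after(x, xs):
--     # sublist strictly after the first occurrence of x, or None if absent
--     for k in range(len(xs)):
--         if xs[k] == x:
--             return xs[k + 1:]
--     return None
--
-- def isMercurial(arr):
--     rest = _after(1, arr)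
--     if rest is None:
--         return 1
--     tail = _after(3, rest)
--     if tail is None:
--         return 1
--     return 0 if _after(1, tail) is not None else 1
-- ===== Notes on version B (the rewrite author's own statement) =====
-- stated objective: alternative
-- what changed: Replaced A's single-pass two-flag state machine with three staged searches: find the first 1, then the first 3 after it, then test for a later 1.
import Mathlib
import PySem

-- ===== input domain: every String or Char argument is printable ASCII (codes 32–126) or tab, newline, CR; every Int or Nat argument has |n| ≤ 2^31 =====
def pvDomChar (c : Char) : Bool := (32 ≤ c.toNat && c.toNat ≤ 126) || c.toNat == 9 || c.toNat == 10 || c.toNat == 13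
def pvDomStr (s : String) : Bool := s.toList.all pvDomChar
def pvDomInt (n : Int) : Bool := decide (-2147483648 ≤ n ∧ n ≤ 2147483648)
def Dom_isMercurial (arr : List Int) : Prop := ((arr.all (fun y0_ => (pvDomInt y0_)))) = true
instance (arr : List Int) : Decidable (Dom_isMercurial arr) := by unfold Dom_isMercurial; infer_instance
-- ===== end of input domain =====

-- B replaces A's two-flag state-machine pass with three staged searches (first 1, first 3 after it, a later 1); alternative decomposition, same cost.


-- ===== PORT A =====
-- the for-loop with its two flag variables and the early `return 0`
def isMercurialAux : List Int → Int → Int → Int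
  | [], _, _ => 1
  | i :: rest, seenOne, seenThree =>
    if i == 1 then
      if seenThree == 1 then 0 else isMercurialAux rest 1 seenThree
    else if i == 3 && seenOne != 0 then
      isMercurialAux rest seenOne 1
    else
      isMercurialAux rest seenOne seenThree

def isMercurial (arr : List Int) : Int := isMercurialAux arr 0 0

-- ===== PORT B =====
-- _after: scan for the first occurrence of x, return the sublist after it, none if absent
def afterFirst (x : Int) : List Int → Option (List Int)
  | [] => none
  | v :: vs => if v == x then some vs else afterFirst x vs

def isMercurial_alt (arr : List Int) : Int :=
  match afterFirst 1 arr with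
  | none => 1
  | some rest =>
    match afterFirst 3 rest with
    | none => 1
    | some tail => if (afterFirst 1 tail).isSome then 0 else 1

-- ===== PRECONDITION & SPEC =====
def Spec_isMercurial (arr : List Int) (out : Int) : Prop := out = isMercurial_alt arr
instance (arr : List Int) (out : Int) : Decidable (Spec_isMercurial arr out) := by unfold Spec_isMercurial; infer_instance

-- ===== CLAIM (what is proved, stated in full; the proofs are below) =====
def Claim_equal_isMercurial : Prop := ∀ (arr : List Int), Dom_isMercurial arr → Spec_isMercurial arr (isMercurial arr)

-- ===== LEMMAS AND PROOFS =====

-- state (seen_one = 1, seen_three = 1): A returns 0 iff another 1 appears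
theorem aux_state11 (arr : List Int) :
    isMercurialAux arr 1 1 = if (afterFirst 1 arr).isSome then 0 else 1 := by
  induction arr with
  | nil => simp [isMercurialAux, afterFirst]
  | cons v vs ih =>
    by_cases h : v = 1
    · simp [isMercurialAux, afterFirst, h]
    · by_cases h3 : v = 3 <;> simp [isMercurialAux, afterFirst, h, h3, ih]

-- state (seen_one = 1, seen_three = 0): A's result via the first 3 and then a later 1
theorem aux_state10 (arr : List Int) :
    isMercurialAux arr 1 0 =
      match afterFirst 3 arr with
      | none => 1
      | some tail => if (afterFirst 1 tail).isSome then 0 else 1 := by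
  induction arr with
  | nil => simp [isMercurialAux, afterFirst]
  | cons v vs ih =>
    by_cases h : v = 1
    · simp [isMercurialAux, afterFirst, h, ih]
    · by_cases h3 : v = 3
      · simp [isMercurialAux, afterFirst, h3, aux_state11]
      · simp [isMercurialAux, afterFirst, h, h3, ih]

-- state (0, 0): A's result via the first 1 then B's staged searches
theorem aux_state00 (arr : List Int) :
    isMercurialAux arr 0 0 = isMercurial_alt arr := by
  induction arr with
  | nil => simp [isMercurialAux, isMercurial_alt, afterFirst]
  | cons v vs ih =>
    by_cases h : v = 1
    · simp [isMercurialAux, isMercurial_alt, afterFirst, h, aux_state10]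
    · by_cases h3 : v = 3 <;>
        simp [isMercurialAux, isMercurial_alt, afterFirst, h, h3] <;>
        simpa [isMercurial_alt] using ih

-- ===== VERDICT (by name: the statement is the Claim_ definition above) =====
theorem isMercurial_spec : Claim_equal_isMercurial := by
  intro arr _
  unfold Spec_isMercurial isMercurial
  exact aux_state00 arr
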